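-- pv_equiv track=rewrite | github.com/skochar1/webalgs | link_prediction.py | find_potential_links
-- ===== SOURCE A (Python) =====
-- from collections import defaultdict
--
-- def find_potential_links(g1, g2, linked_pairs):
--     """
--     Calculate potential links between two graphs based on linked pairs.
--
--     Parameters:
--         g1 (dict): First graph as a dictionary.
--         g2 (dict): Second graph as a dictionary.
--         linked_pairs (list): List of linked pairs.
--
--     Returns:
--         dict: Potential links with common neighbors count.
--     """
--     g1_to_g2 = {pair[0]: pair[1] for pair in linked_pairs}
--     potential_links = defaultdict(list)
--     for node1, neighbors1 in g1.items():
--         translated_neighbors1 = {g1_to_g2.get(n) for n in neighbors1 if n in g1_to_g2}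
--         for node2 in g2:
--             common = sum(1 for n in translated_neighbors1 if n in g2[node2])
--             if common > 0:
--                 potential_links[node1].append((node2, common))
--         potential_links[node1] = sorted(potential_links[node1], key=lambda x: (-x[1], int(x[0])))
--
--     return potential_links
-- ===== SOURCE B (Python) =====
-- def find_potential_links(g1, g2, linked_pairs):
--     """Inverted index from translated value to g2 nodes: each node1 only touches
--     the g2 nodes its translated neighbors actually appear in, instead of scanning
--     every neighbor list of g2 for every node1."""
--     g1_to_g2 = {p[0]: p[1] for p in linked_pairs}
--     # inverted index: value v -> list of g2 nodes whose neighbor list contains v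
--     inv = {}
--     for node2, nbrs2 in g2.items():
--         for v in dict.fromkeys(nbrs2):
--             inv.setdefault(v, []).append(node2)
--     result = {}
--     for node1, neighbors1 in g1.items():
--         translated = {g1_to_g2[n] for n in neighbors1 if n in g1_to_g2}
--         cnt = {}
--         for v in translated:
--             for node2 in inv.get(v, []):
--                 cnt[node2] = cnt.get(node2, 0) + 1
--         links = [(node2, cnt[node2]) for node2 in g2 if node2 in cnt]
--         links.sort(key=lambda x: (-x[1], int(x[0])))
--         result[node1] = links
--     return result
-- ===== Notes on version B (the rewrite author's own statement) =====
-- stated objective: faster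
-- what changed: A scans every g2 neighbor list for every g1 node (nested membership sums); B builds an inverted index from translated value to the g2 nodes containing it once, then per g1 node accumulates counts only over actual contributions, reading the result off in g2 order.
import Mathlib
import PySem

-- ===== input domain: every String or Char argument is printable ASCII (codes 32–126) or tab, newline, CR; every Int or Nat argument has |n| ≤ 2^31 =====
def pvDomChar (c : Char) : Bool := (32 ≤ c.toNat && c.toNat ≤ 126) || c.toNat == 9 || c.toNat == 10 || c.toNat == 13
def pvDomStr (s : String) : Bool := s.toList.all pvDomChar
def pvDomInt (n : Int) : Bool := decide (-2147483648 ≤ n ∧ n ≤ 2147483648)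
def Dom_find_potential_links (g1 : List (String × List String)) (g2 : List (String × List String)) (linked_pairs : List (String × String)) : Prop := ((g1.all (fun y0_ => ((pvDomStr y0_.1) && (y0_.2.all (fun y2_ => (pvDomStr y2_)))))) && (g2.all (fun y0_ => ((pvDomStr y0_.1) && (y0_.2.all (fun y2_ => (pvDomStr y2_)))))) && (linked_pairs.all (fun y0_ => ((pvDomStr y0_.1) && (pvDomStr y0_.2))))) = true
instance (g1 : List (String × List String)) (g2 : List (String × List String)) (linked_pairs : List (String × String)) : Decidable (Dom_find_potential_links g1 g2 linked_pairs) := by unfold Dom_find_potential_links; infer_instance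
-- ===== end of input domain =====

-- B replaces A's per-(node1,node2) membership sums by an inverted index from translated
-- value to g2 nodes, accumulating counts only over actual contributions (objective: faster).

-- ===== PORT A =====
-- sorted(lst, key=lambda x: (-x[1], int(x[0]))) — shared by both programs' sorts (list.sort uses the same key)
def pvSortLinks (links : List (String × Int)) : List (String × Int) :=
  PySem.List.sorted2 links (fun x => -x.2) (fun x => (PySem.Int.ofStr? x.1).getD 0)

def find_potential_links (g1 : List (String × List String)) (g2 : List (String × List String)) (linked_pairs : List (String × String)) : List (String × List (String × Int)) :=
  let m := PySem.Dict.ofList linked_pairs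
  let d1 := PySem.Dict.ofList g1
  let d2 := PySem.Dict.ofList g2
  d1.items.foldl (fun acc p =>
    let t : PySem.Set String := PySem.Set.ofList (p.2.filterMap (fun n => m.get? n))
    let links := d2.keys.foldl (fun l node2 =>
      let common : Int := t.foldl (fun s n => if n ∈ d2.getD node2 [] then s + 1 else s) 0
      if common > 0 then l ++ [(node2, common)] else l) []
    acc ++ [(p.1, pvSortLinks links)]) []

-- ===== PORT B =====
def find_potential_links_alt (g1 : List (String × List String)) (g2 : List (String × List String)) (linked_pairs : List (String × String)) : List (String × List (String × Int)) :=
  let m := PySem.Dict.ofList linked_pairs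
  let d2 := PySem.Dict.ofList g2
  let inv : PySem.Dict String (List String) :=
    d2.items.foldl (fun iv q =>
      (PySem.List.dedup q.2).foldl (fun iv2 v => iv2.modify v [] (· ++ [q.1])) iv)
      PySem.Dict.empty
  (PySem.Dict.ofList g1).items.foldl (fun acc p =>
    let t : PySem.Set String := PySem.Set.ofList (p.2.filterMap (fun n => m.get? n))
    let cnt : PySem.Dict String Int :=
      t.foldl (fun c v =>
        (inv.getD v []).foldl (fun c2 node2 => c2.insert node2 (c2.getD node2 0 + 1)) c)
        PySem.Dict.empty
    let links := d2.keys.foldl (fun l node2 =>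
      if cnt.contains node2 then l ++ [(node2, cnt.getD node2 0)] else l) []
    acc ++ [(p.1, pvSortLinks links)]) []

-- ===== PRECONDITION & SPEC =====
-- Pre_ excludes exactly the inputs on which the Python raises ValueError: some g2 node with
-- at least one common translated neighbor has a key that int() cannot parse (the sort key int(x[0])).
def Pre_find_potential_links (g1 : List (String × List String)) (g2 : List (String × List String)) (linked_pairs : List (String × String)) : Prop :=
  ∀ q ∈ (PySem.Dict.ofList g2).items,
    (∃ p ∈ (PySem.Dict.ofList g1).items, ∃ n ∈ p.2,
       ((PySem.Dict.ofList linked_pairs).get? n).any (fun v => decide (v ∈ q.2)) = true) →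
    (PySem.Int.ofStr? q.1).isSome = true
instance (g1 : List (String × List String)) (g2 : List (String × List String)) (linked_pairs : List (String × String)) : Decidable (Pre_find_potential_links g1 g2 linked_pairs) := by unfold Pre_find_potential_links; infer_instance

def pvWitness_find_potential_links : (List (String × List String)) × (List (String × List String)) × (List (String × String)) :=
  ([("a", ["x"])], [("1", ["y"])], [("x", "y")])

def Spec_find_potential_links (g1 : List (String × List String)) (g2 : List (String × List String)) (linked_pairs : List (String × String)) (out : List (String × List (String × Int))) : Prop := out = find_potential_links_alt g1 g2 linked_pairs
instance (g1 : List (String × List String)) (g2 : List (String × List String)) (linked_pairs : List (String × String)) (out : List (String × List (String × Int))) : Decidable (Spec_find_potential_links g1 g2 linked_pairs out) := by unfold Spec_find_potential_links; infer_instance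

-- ===== CLAIM (what is proved, stated in full; the proofs are below) =====
def Claim_equal_find_potential_links : Prop := ∀ (g1 : List (String × List String)) (g2 : List (String × List String)) (linked_pairs : List (String × String)), Dom_find_potential_links g1 g2 linked_pairs → Pre_find_potential_links g1 g2 linked_pairs → Spec_find_potential_links g1 g2 linked_pairs (find_potential_links g1 g2 linked_pairs)

-- ===== LEMMAS AND PROOFS =====
-- g2 nodes (in dict order) whose neighbor list contains v
def pvOcc (items : List (String × List String)) (v : String) : List String :=
  items.flatMap (fun q => if v ∈ q.2 then [q.1] else [])

theorem pvOcc_step (q : String × List String) (iv : PySem.Dict String (List String)) (v : String) :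
    ((PySem.List.dedup q.2).foldl (fun iv2 w => iv2.modify w [] (· ++ [q.1])) iv).getD v []
      = iv.getD v [] ++ (if v ∈ q.2 then [q.1] else []) := by
  rw [← List.foldl_map (f := fun w => (w, q.1))
        (g := fun (d : PySem.Dict String (List String)) (p : String × String) => d.modify p.1 [] (· ++ [p.2])),
      PySem.Dict.getD_foldl_modify_append, List.filter_map]
  have hcnt : List.count v (PySem.List.dedup q.2) = if v ∈ q.2 then 1 else 0 := by
    by_cases h : v ∈ q.2
    · rw [if_pos h]
      exact List.count_eq_one_of_mem (PySem.List.nodup_dedup q.2)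
        (by simp [h])
    · rw [if_neg h]
      exact List.count_eq_zero.mpr (by simp [h])
  have hpred : ((fun (p : String × String) => p.1 == v) ∘ fun w => (w, q.1)) = (fun x => x == v) := by
    funext w; rfl
  rw [hpred, List.filter_beq, hcnt]
  by_cases h : v ∈ q.2 <;> simp [h]

theorem inv_getD (items : List (String × List String)) (iv : PySem.Dict String (List String)) (v : String) :
    ((items.foldl (fun iv q => (PySem.List.dedup q.2).foldl (fun iv2 w => iv2.modify w [] (· ++ [q.1])) iv) iv).getD v [])
      = iv.getD v [] ++ pvOcc items v := by
  induction items generalizing iv with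
  | nil => simp [pvOcc]
  | cons q L ih =>
    simp only [List.foldl_cons]
    rw [ih, pvOcc_step]
    simp [pvOcc, List.append_assoc]

theorem mem_pvOcc (items : List (String × List String)) (v x : String) (h : x ∈ pvOcc items v) :
    x ∈ items.map (·.1) := by
  simp only [pvOcc, List.mem_flatMap] at h
  obtain ⟨q, hq, hx⟩ := h
  by_cases hv : v ∈ q.2 <;> simp [hv] at hx
  subst hx; exact List.mem_map_of_mem hq

theorem pvOcc_count (items : List (String × List String)) (hnd : (items.map (·.1)).Nodup)
    (k : String) (w : List String) (hkw : (k, w) ∈ items) (v : String) :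
    (pvOcc items v).count k = if v ∈ w then 1 else 0 := by
  induction items with
  | nil => cases hkw
  | cons q L ih =>
    simp only [List.map_cons, List.nodup_cons] at hnd
    have hocc : pvOcc (q :: L) v = (if v ∈ q.2 then [q.1] else []) ++ pvOcc L v := by
      simp [pvOcc]
    rw [hocc, List.count_append]
    rcases List.mem_cons.mp hkw with h | h
    · have hq1 : q.1 = k := by rw [← h]
      have hz : (pvOcc L v).count k = 0 := by
        apply List.count_eq_zero.mpr
        intro hmem
        exact hnd.1 (hq1 ▸ mem_pvOcc L v k hmem)
      have hw : q.2 = w := by rw [← h]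
      rw [hz, hq1, ← hw]
      by_cases hv : v ∈ q.2 <;> simp [hv]
    · have hk : k ∈ L.map (·.1) := List.mem_map_of_mem (f := (·.1)) h
      have hne : q.1 ≠ k := fun he => hnd.1 (he ▸ hk)
      have : List.count k (if v ∈ q.2 then [q.1] else []) = 0 := by
        by_cases hv : v ∈ q.2 <;> simp [hv, hne]
      rw [this, ih hnd.2 h]; omega

theorem flat_count (t : List String) (items : List (String × List String))
    (hnd : (items.map (·.1)).Nodup) (k : String) (w : List String) (hkw : (k, w) ∈ items) :
    (t.flatMap (fun v => pvOcc items v)).count k = t.countP (fun v => decide (v ∈ w)) := by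
  rw [List.count_flatMap]
  induction t with
  | nil => simp
  | cons v t ih =>
    simp only [List.map_cons, List.sum_cons, List.countP_cons, Function.comp_apply,
      pvOcc_count items hnd k w hkw v, ih]
    by_cases hv : v ∈ w
    · simp [hv]; omega
    · simp [hv]

-- proof-only names for B's inverted index and per-node1 counter
def pvInv (g2 : List (String × List String)) : PySem.Dict String (List String) :=
  (PySem.Dict.ofList g2).items.foldl
    (fun iv q => (PySem.List.dedup q.2).foldl (fun iv2 v => iv2.modify v [] (· ++ [q.1])) iv)
    PySem.Dict.empty

def pvCnt (g2 : List (String × List String)) (t : List String) : PySem.Dict String Int :=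
  t.foldl (fun c v => ((pvInv g2).getD v []).foldl (fun c2 node2 => c2.insert node2 (c2.getD node2 0 + 1)) c)
    PySem.Dict.empty

theorem pvInv_getD (g2 : List (String × List String)) (v : String) :
    (pvInv g2).getD v [] = pvOcc (PySem.Dict.ofList g2).items v := by
  unfold pvInv
  rw [inv_getD]
  simp

theorem pvCnt_eq (g2 : List (String × List String)) (t : List String) :
    pvCnt g2 t = PySem.Dict.counter (t.flatMap (fun v => pvOcc (PySem.Dict.ofList g2).items v)) := by
  rw [← PySem.Dict.foldl_insert_getD_add_one_eq_counter, List.foldl_flatMap]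
  unfold pvCnt
  apply PySem.List.foldl_congr_mem
  intro acc v _
  rw [pvInv_getD]

theorem count_fold_int (t : List String) (w : List String) (s : Int) :
    t.foldl (fun s n => if n ∈ w then s + 1 else s) s = s + (t.countP (fun n => decide (n ∈ w)) : Int) := by
  have := PySem.List.foldl_count_if (fun n => decide (n ∈ w)) t s
  simpa using this

theorem step_eq (g2 : List (String × List String)) (t : List String) (l : List (String × Int))
    (node2 : String) (h : node2 ∈ (PySem.Dict.ofList g2).keys) :
    (if (t.foldl (fun s n => if n ∈ (PySem.Dict.ofList g2).getD node2 [] then s + 1 else s) (0:Int)) > 0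
     then l ++ [(node2, t.foldl (fun s n => if n ∈ (PySem.Dict.ofList g2).getD node2 [] then s + 1 else s) (0:Int))]
     else l)
  = (if (pvCnt g2 t).contains node2 then l ++ [(node2, (pvCnt g2 t).getD node2 0)] else l) := by
  have hnd : ((PySem.Dict.ofList g2).items.map (·.1)).Nodup := by
    simpa [PySem.Dict.keys] using PySem.Dict.nodup_keys_ofList g2
  obtain ⟨w, hitem⟩ : ∃ w, (node2, w) ∈ (PySem.Dict.ofList g2).items := by
    simpa [PySem.Dict.keys] using h
  have hgetD : (PySem.Dict.ofList g2).getD node2 [] = w :=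
    PySem.Dict.getD_of_mem_items _ hitem (PySem.Dict.nodup_keys_ofList g2) []
  have hcommon := count_fold_int t ((PySem.Dict.ofList g2).getD node2 []) 0
  rw [hgetD] at hcommon
  have hflat := flat_count t (PySem.Dict.ofList g2).items hnd node2 w hitem
  have hcnt_getD : (pvCnt g2 t).getD node2 0 = (t.countP (fun n => decide (n ∈ w)) : Int) := by
    rw [pvCnt_eq, PySem.Dict.getD_counter, hflat]
  have hmem : (pvCnt g2 t).contains node2 = true ↔ 0 < t.countP (fun n => decide (n ∈ w)) := by
    rw [pvCnt_eq, PySem.Dict.contains_counter]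
    rw [← hflat, List.contains_iff_mem, ← List.count_pos_iff]
  rw [hgetD, hcommon, hcnt_getD]
  by_cases hc : 0 < t.countP (fun n => decide (n ∈ w))
  · have h1 : (0:Int) + (t.countP (fun n => decide (n ∈ w)) : Int) > 0 := by omega
    rw [if_pos h1, if_pos (hmem.mpr hc)]
    norm_num
  · have h1 : ¬ ((0:Int) + (t.countP (fun n => decide (n ∈ w)) : Int) > 0) := by omega
    have h2 : ¬ ((pvCnt g2 t).contains node2 = true) := fun hh => hc (hmem.mp hh)
    rw [if_neg h1, if_neg h2]

-- ===== VERDICT (by name: the statement is the Claim_ definition above) =====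
theorem find_potential_links_spec : Claim_equal_find_potential_links := by
  intro g1 g2 lp _ _
  unfold Spec_find_potential_links find_potential_links find_potential_links_alt
  rw [PySem.List.foldl_append_singleton_eq_map, PySem.List.foldl_append_singleton_eq_map]
  simp only [List.nil_append]
  apply List.map_congr_left
  intro p _
  refine congrArg (fun x => (p.1, pvSortLinks x)) ?_
  apply PySem.List.foldl_congr_mem
  intro acc node2 hmem
  exact step_eq g2 (PySem.Set.ofList (p.2.filterMap (fun n => (PySem.Dict.ofList lp).get? n))) acc node2 hmem
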